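-- pv_equiv track=rewrite | github.com/GUIBL1/CompareSimulation | simulator/topology/builder.py | _enumerate_shortest_paths
-- ===== SOURCE A (Python) =====
-- from collections import deque
--
-- def _enumerate_shortest_paths(
--     adjacency: dict[str, list[str]],
--     src: str,
--     dst: str,
--     max_paths: int,
-- ) -> list[list[str]]:
--     queue: deque[list[str]] = deque([[src]])
--     results: list[list[str]] = []
--     shortest_length: int | None = None
--
--     while queue and len(results) < max_paths:
--         path = queue.popleft()
--         current = path[-1]
--         if shortest_length is not None and len(path) > shortest_length:
--             continue
--         if current == dst:
--             shortest_length = len(path)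
--             results.append(path)
--             continue
--         for neighbor in adjacency.get(current, []):
--             if neighbor in path:
--                 continue
--             queue.append(path + [neighbor])
--
--     return results
-- ===== SOURCE B (Python) =====
-- def _enumerate_shortest_paths(adjacency, src, dst, max_paths):
--     if max_paths <= 0:
--         return []
--
--     def dfs(budget, path):
--         if budget == 0:
--             return [path]
--         return [q
--                 for n in adjacency.get(path[-1], [])
--                 if n not in path
--                 for q in dfs(budget - 1, path + [n])]
--
--     depth = 0
--     while True:
--         leaves = dfs(depth, [src])
--         hits = [p for p in leaves if p[-1] == dst]
--         if hits:
--             return hits[:max_paths]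
--         if not leaves:
--             return []
--         depth += 1
-- ===== Notes on version B (the rewrite author's own statement) =====
-- stated objective: alternative
-- what changed: Replaces A's FIFO deque of partial paths with a mutable shortest-length cutoff by iterative-deepening DFS: a recursive depth-limited DFS enumerates simple paths of each exact length, and the outer loop returns the hits of the first depth that reaches dst, truncated to max_paths.
import Mathlib
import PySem

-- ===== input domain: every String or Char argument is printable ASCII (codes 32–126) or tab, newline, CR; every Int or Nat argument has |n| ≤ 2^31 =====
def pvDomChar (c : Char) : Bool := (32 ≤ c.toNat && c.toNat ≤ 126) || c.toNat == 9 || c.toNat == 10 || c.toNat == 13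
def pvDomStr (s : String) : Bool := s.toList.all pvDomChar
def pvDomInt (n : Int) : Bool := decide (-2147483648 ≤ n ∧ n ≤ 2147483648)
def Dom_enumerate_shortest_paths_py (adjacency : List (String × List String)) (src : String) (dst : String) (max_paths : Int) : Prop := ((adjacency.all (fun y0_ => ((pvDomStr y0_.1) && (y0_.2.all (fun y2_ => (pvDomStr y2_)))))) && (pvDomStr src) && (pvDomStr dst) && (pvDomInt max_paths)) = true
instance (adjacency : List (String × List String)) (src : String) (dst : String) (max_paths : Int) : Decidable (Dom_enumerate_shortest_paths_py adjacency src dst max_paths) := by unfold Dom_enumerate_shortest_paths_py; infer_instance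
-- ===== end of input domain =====

-- B re-implements the path enumeration by iterative-deepening DFS (a recursive depth-limited
-- DFS per depth, return the hits of the first depth reaching dst, truncated to max_paths)
-- instead of A's FIFO queue of partial paths with a mutable shortest-length cutoff; same
-- return value, objective: alternative (same cost, different algorithmic structure).

-- == termination measure for PORT A's queue recursion ==
def pvBranch (adjacency : List (String × List String)) : Nat :=
  (adjacency.flatMap Prod.snd).length

def pvUniv (adjacency : List (String × List String)) : List String :=
  (adjacency.flatMap Prod.snd).dedup

def pvPot (adjacency : List (String × List String)) (p : List String) : Nat :=
  (pvBranch adjacency + 1) ^ ((pvUniv adjacency).filter (fun x => !p.contains x)).length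

def pvMeasure (adjacency : List (String × List String)) (q : List (List String)) : Nat :=
  (q.map (pvPot adjacency)).sum

theorem pvPot_pos (adjacency : List (String × List String)) (p : List String) :
    0 < pvPot adjacency p := pow_pos (by omega) _

theorem pvMeasure_append (adjacency : List (String × List String)) (a b : List (List String)) :
    pvMeasure adjacency (a ++ b) = pvMeasure adjacency a + pvMeasure adjacency b := by
  simp [pvMeasure]

theorem pvMeasure_cons (adjacency : List (String × List String)) (p : List String)
    (q : List (List String)) :
    pvMeasure adjacency (p :: q) = pvPot adjacency p + pvMeasure adjacency q := by
  simp [pvMeasure]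

-- A's inner for-loop over neighbours, rewritten as append of the filtered/mapped children
theorem push_foldl (path : List String) (q : List (List String)) (neigh : List String) :
    neigh.foldl (fun q n => if path.contains n then q else q ++ [path ++ [n]]) q
      = q ++ (neigh.filter (fun n => !path.contains n)).map (fun n => path ++ [n]) := by
  induction neigh generalizing q with
  | nil => simp
  | cons a l ih =>
    simp only [List.foldl_cons, List.filter_cons]
    cases h : path.contains a
    · rw [if_neg (by simp [h]), ih]
      simp [h]
    · rw [if_pos (by simp [h]), ih]
      simp [h]

theorem getD_mk_cases (adjacency : List (String × List String)) (c : String) :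
    (PySem.Dict.mk adjacency).getD c [] = [] ∨
      ∃ pr ∈ adjacency, (PySem.Dict.mk adjacency).getD c [] = pr.2 := by
  induction adjacency with
  | nil =>
    left
    rw [PySem.Dict.getD_eq_get?_getD]
    have : (PySem.Dict.mk ([] : List (String × List String))).get? c = none := by
      have := PySem.Dict.get?_empty (κ := String) (ν := List String) c
      exact this
    rw [this]; rfl
  | cons pr rest ih =>
    by_cases h : (pr.1 == c) = true
    · right
      refine ⟨pr, by simp, ?_⟩
      rw [PySem.Dict.getD_eq_get?_getD, PySem.Dict.get?_mk_cons, if_pos h]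
      rfl
    · have hstep : (PySem.Dict.mk (pr :: rest)).getD c [] = (PySem.Dict.mk rest).getD c [] := by
        rw [PySem.Dict.getD_eq_get?_getD, PySem.Dict.get?_mk_cons, if_neg h,
          PySem.Dict.getD_eq_get?_getD]
      rw [hstep]
      rcases ih with h1 | ⟨pr', hmem, heq⟩
      · left; exact h1
      · right; exact ⟨pr', List.mem_cons_of_mem _ hmem, heq⟩

theorem mem_getD_mem_flatMap {adjacency : List (String × List String)} {c n : String}
    (h : n ∈ (PySem.Dict.mk adjacency).getD c []) : n ∈ adjacency.flatMap Prod.snd := by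
  rcases getD_mk_cases adjacency c with he | ⟨pr, hmem, heq⟩
  · rw [he] at h; cases h
  · rw [heq] at h; exact List.mem_flatMap.2 ⟨pr, hmem, h⟩

theorem length_getD_le (adjacency : List (String × List String)) (c : String) :
    ((PySem.Dict.mk adjacency).getD c []).length ≤ pvBranch adjacency := by
  rcases getD_mk_cases adjacency c with he | ⟨pr, hmem, heq⟩
  · rw [he]; exact Nat.zero_le _
  · rw [heq, pvBranch, List.length_flatMap]
    exact List.single_le_sum (by intro x _; exact Nat.zero_le x) _
      (List.mem_map.2 ⟨pr, hmem, rfl⟩)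

theorem filter_length_mono {α : Type} (l : List α) (P Q : α → Bool)
    (himp : ∀ x, Q x = true → P x = true) :
    (l.filter Q).length ≤ (l.filter P).length := by
  induction l with
  | nil => simp
  | cons a l ih =>
    by_cases hq : Q a
    · simp [List.filter_cons, hq, himp a hq]; omega
    · simp only [List.filter_cons, hq, if_false]
      by_cases hp : P a <;> simp [hp] <;> omega

theorem filter_length_lt {α : Type} (l : List α) (P Q : α → Bool)
    (himp : ∀ x, Q x = true → P x = true) (x : α) (hx : x ∈ l)
    (hP : P x = true) (hQ : Q x = false) :
    (l.filter Q).length < (l.filter P).length := by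
  induction l with
  | nil => cases hx
  | cons a l ih =>
    rcases List.mem_cons.1 hx with rfl | hx'
    · have h1 := filter_length_mono l P Q himp
      simp [List.filter_cons, hP, hQ]; omega
    · have h2 := ih hx'
      by_cases hq : Q a
      · simp [List.filter_cons, hq, himp a hq]; omega
      · simp only [List.filter_cons, hq, if_false]
        by_cases hp : P a <;> simp [hp] <;> omega

theorem pvPot_child {adjacency : List (String × List String)} {c n : String}
    {p : List String} (hn : n ∈ (PySem.Dict.mk adjacency).getD c [])
    (hnp : ¬ p.contains n) :
    (pvBranch adjacency + 1) * pvPot adjacency (p ++ [n]) ≤ pvPot adjacency p := by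
  have hmem : n ∈ pvUniv adjacency := by
    rw [pvUniv, List.mem_dedup]; exact mem_getD_mem_flatMap hn
  have hlt : ((pvUniv adjacency).filter (fun x => !(p ++ [n]).contains x)).length
      < ((pvUniv adjacency).filter (fun x => !p.contains x)).length := by
    refine filter_length_lt _ _ _ ?_ n hmem (by simpa using hnp) (by simp)
    intro x hx
    simp only [Bool.not_eq_true', List.contains_eq_mem, decide_eq_false_iff_not,
      List.mem_append] at hx ⊢
    exact fun hc => hx (Or.inl hc)
  rw [pvPot, pvPot, ← pow_succ']
  exact Nat.pow_le_pow_right (by omega) (by omega)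

theorem mul_sum_le {α : Type} (l : List α) (f : α → Nat) (c P : Nat)
    (h : ∀ x ∈ l, c * f x ≤ P) : c * (l.map f).sum ≤ l.length * P := by
  induction l with
  | nil => simp
  | cons a l ih =>
    have h1 := h a (by simp)
    have h2 := ih (fun x hx => h x (by simp [hx]))
    simp only [List.map_cons, List.sum_cons, List.length_cons, Nat.mul_add, Nat.succ_mul]
    omega

theorem sum_children_lt (adjacency : List (String × List String)) (c : String)
    (p : List String) :
    pvMeasure adjacency
      ((((PySem.Dict.mk adjacency).getD c []).filter (fun n => !p.contains n)).map
        (fun n => p ++ [n])) < pvPot adjacency p := by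
  set B := pvBranch adjacency with hB
  set l := ((PySem.Dict.mk adjacency).getD c []).filter (fun n => !p.contains n) with hl
  have hkey : (B + 1) * pvMeasure adjacency (l.map (fun n => p ++ [n]))
      ≤ l.length * pvPot adjacency p := by
    rw [pvMeasure, List.map_map]
    apply mul_sum_le
    intro n hn
    rw [hl, List.mem_filter] at hn
    exact pvPot_child hn.1 (by simpa using hn.2)
  have hlen : l.length ≤ B := by
    rw [hl]
    calc (((PySem.Dict.mk adjacency).getD c []).filter _).length
        ≤ ((PySem.Dict.mk adjacency).getD c []).length := List.length_filter_le _ _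
      _ ≤ B := length_getD_le adjacency c
  have hpos := pvPot_pos adjacency p
  have : (B + 1) * pvMeasure adjacency (l.map (fun n => p ++ [n]))
      < (B + 1) * pvPot adjacency p := by
    calc (B + 1) * pvMeasure adjacency (l.map (fun n => p ++ [n]))
        ≤ l.length * pvPot adjacency p := hkey
      _ ≤ B * pvPot adjacency p := Nat.mul_le_mul_right _ hlen
      _ < (B + 1) * pvPot adjacency p :=
          (Nat.mul_lt_mul_right hpos).2 (Nat.lt_succ_self B)
  exact Nat.lt_of_mul_lt_mul_left this

-- ===== PORT A =====
-- helper: 'shortest_length is not None and len(path) > shortest_length'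
def espSkip (shortest : Option Int) (len : Nat) : Bool :=
  match shortest with
  | none => false
  | some s => decide ((len : Int) > s)

-- the while-loop of A: FIFO queue of paths, results accumulator, shortest_length
def espLoopA (adjacency : List (String × List String)) (dst : String) (max_paths : Int)
    (queue results : List (List String)) (shortest : Option Int) : List (List String) :=
  match queue with
  | [] => results
  | path :: rest =>
    if (results.length : Int) < max_paths then
      match PySem.List.pyGet? path (-1) with
      | none => results  -- path[-1] IndexError: unreachable, queued paths are nonempty
      | some current =>
        if espSkip shortest path.length then
          espLoopA adjacency dst max_paths rest results shortest
        else if current == dst then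
          espLoopA adjacency dst max_paths rest (results ++ [path]) (some (path.length : Int))
        else
          espLoopA adjacency dst max_paths
            (((PySem.Dict.mk adjacency).getD current []).foldl
              (fun q n => if path.contains n then q else q ++ [path ++ [n]]) rest)
            results shortest
    else results
termination_by pvMeasure adjacency queue
decreasing_by
  · have := pvPot_pos adjacency path
    simp only [pvMeasure_cons]; omega
  · have := pvPot_pos adjacency path
    simp only [pvMeasure_cons]; omega
  · simp only [dite_eq_ite]
    rw [push_foldl, pvMeasure_append]
    have h := sum_children_lt adjacency current path
    simp only [pvMeasure_cons]; omega

def enumerate_shortest_paths_py (adjacency : List (String × List String)) (src : String) (dst : String) (max_paths : Int) : List (List String) :=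
  espLoopA adjacency dst max_paths [[src]] [] none

-- ===== PORT B =====
-- 'p[-1] == dst'
def iddHit (dst : String) (p : List String) : Bool :=
  match PySem.List.pyGet? p (-1) with
  | none => false  -- p[-1] IndexError: unreachable, enumerated paths are nonempty
  | some c => c == dst

-- the recursive depth-limited DFS of B:
-- '[q for n in adjacency.get(path[-1], []) if n not in path for q in dfs(budget-1, path+[n])]'
def iddDfs (adjacency : List (String × List String)) : Nat → List String → List (List String)
  | 0, path => [path]
  | b + 1, path =>
    match PySem.List.pyGet? path (-1) with
    | none => []  -- path[-1] IndexError: unreachable, enumerated paths are nonempty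
    | some c =>
      (((PySem.Dict.mk adjacency).getD c []).filter (fun n => !path.contains n)).flatMap
        (fun n => iddDfs adjacency b (path ++ [n]))

-- == termination bound for B's deepening loop: depths are bounded by the number of nodes ==
def iddUniverse (adjacency : List (String × List String)) (src : String) : List String :=
  (src :: adjacency.flatMap Prod.snd).dedup

theorem iddDfs_length {adjacency : List (String × List String)} :
    ∀ (b : Nat) (p q : List String), q ∈ iddDfs adjacency b p → q.length = p.length + b := by
  intro b
  induction b with
  | zero => intro p q h; simp [iddDfs] at h; simp [h]
  | succ b ih =>
    intro p q h
    rw [iddDfs] at h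
    cases hg : PySem.List.pyGet? p (-1) with
    | none => rw [hg] at h; cases h
    | some c =>
      rw [hg] at h
      obtain ⟨n, _, hq⟩ := List.mem_flatMap.1 h
      have := ih (p ++ [n]) q hq
      simp at this
      omega

theorem iddDfs_nodup {adjacency : List (String × List String)} :
    ∀ (b : Nat) (p q : List String), p.Nodup → q ∈ iddDfs adjacency b p → q.Nodup := by
  intro b
  induction b with
  | zero => intro p q hp h; simp [iddDfs] at h; simpa [h] using hp
  | succ b ih =>
    intro p q hp h
    rw [iddDfs] at h
    cases hg : PySem.List.pyGet? p (-1) with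
    | none => rw [hg] at h; cases h
    | some c =>
      rw [hg] at h
      obtain ⟨n, hn, hq⟩ := List.mem_flatMap.1 h
      rw [List.mem_filter] at hn
      refine ih (p ++ [n]) q ?_ hq
      have hnp : n ∉ p := by simpa using hn.2
      simp only [List.nodup_append, List.nodup_singleton, true_and]
      exact ⟨hp, fun a ha b hb => by simp at hb; exact fun he => hnp ((he.trans hb) ▸ ha)⟩

theorem iddDfs_subset {adjacency : List (String × List String)} {src : String} :
    ∀ (b : Nat) (p q : List String), (∀ x ∈ p, x ∈ iddUniverse adjacency src) →
      q ∈ iddDfs adjacency b p → ∀ x ∈ q, x ∈ iddUniverse adjacency src := by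
  intro b
  induction b with
  | zero => intro p q hp h; simp [iddDfs] at h; simpa [h] using hp
  | succ b ih =>
    intro p q hp h
    rw [iddDfs] at h
    cases hg : PySem.List.pyGet? p (-1) with
    | none => rw [hg] at h; cases h
    | some c =>
      rw [hg] at h
      obtain ⟨n, hn, hq⟩ := List.mem_flatMap.1 h
      rw [List.mem_filter] at hn
      refine ih (p ++ [n]) q ?_ hq
      intro x hx
      rcases List.mem_append.1 hx with hx | hx
      · exact hp x hx
      · have : x ∈ adjacency.flatMap Prod.snd := by
          rw [List.mem_singleton.1 hx]; exact mem_getD_mem_flatMap hn.1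
        rw [iddUniverse, List.mem_dedup]
        exact List.mem_cons_of_mem _ this

theorem idd_depth_lt (adjacency : List (String × List String)) (src : String) (d : Nat)
    (h : iddDfs adjacency d [src] ≠ []) : d < (iddUniverse adjacency src).length := by
  obtain ⟨q, hq⟩ := List.exists_mem_of_ne_nil _ h
  have hlen : q.length = d + 1 := by
    have h0 := iddDfs_length (adjacency := adjacency) d [src] q hq
    simp at h0; omega
  have hnd : q.Nodup := iddDfs_nodup d [src] q (by simp) hq
  have hsub : ∀ x ∈ q, x ∈ iddUniverse adjacency src := by
    refine iddDfs_subset d [src] q ?_ hq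
    intro x hx
    rw [List.mem_singleton.1 hx, iddUniverse, List.mem_dedup]
    exact List.mem_cons_self
  have h1 : q.length = q.toFinset.card := (List.toFinset_card_of_nodup hnd).symm
  have h2 : q.toFinset ⊆ (iddUniverse adjacency src).toFinset := by
    intro x hx
    rw [List.mem_toFinset] at hx ⊢
    exact hsub x hx
  have h3 : (iddUniverse adjacency src).toFinset.card ≤ (iddUniverse adjacency src).length :=
    List.toFinset_card_le _
  have := Finset.card_le_card h2
  omega

-- the deepening loop of B: 'depth = 0; while True: …; depth += 1'
def iddSolve (adjacency : List (String × List String)) (src : String) (dst : String)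
    (max_paths : Int) (depth : Nat) : List (List String) :=
  let leaves := iddDfs adjacency depth [src]
  let hits := leaves.filter (iddHit dst)
  if hits.isEmpty then
    if leaves.isEmpty then []
    else iddSolve adjacency src dst max_paths (depth + 1)
  else PySem.List.slice hits none (some max_paths)
termination_by (iddUniverse adjacency src).length + 1 - depth
decreasing_by
  have hne : iddDfs adjacency depth [src] ≠ [] := by
    simpa [List.isEmpty_iff] using ‹¬ (iddDfs adjacency depth [src]).isEmpty = true›
  have := idd_depth_lt adjacency src depth hne
  omega

def enumerate_shortest_paths_py_alt (adjacency : List (String × List String)) (src : String) (dst : String) (max_paths : Int) : List (List String) :=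
  if max_paths ≤ 0 then []
  else iddSolve adjacency src dst max_paths 0

-- ===== PRECONDITION & SPEC =====
def Spec_enumerate_shortest_paths_py (adjacency : List (String × List String)) (src : String) (dst : String) (max_paths : Int) (out : List (List String)) : Prop := out = enumerate_shortest_paths_py_alt adjacency src dst max_paths
instance (adjacency : List (String × List String)) (src : String) (dst : String) (max_paths : Int) (out : List (List String)) : Decidable (Spec_enumerate_shortest_paths_py adjacency src dst max_paths out) := by unfold Spec_enumerate_shortest_paths_py; infer_instance

-- ===== CLAIM (what is proved, stated in full; the proofs are below) =====
def Claim_equal_enumerate_shortest_paths_py : Prop := ∀ (adjacency : List (String × List String)) (src : String) (dst : String) (max_paths : Int), Dom_enumerate_shortest_paths_py adjacency src dst max_paths → Spec_enumerate_shortest_paths_py adjacency src dst max_paths (enumerate_shortest_paths_py adjacency src dst max_paths)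

-- ===== LEMMAS AND PROOFS =====

-- proof-only intermediate view: the level-synchronous BFS over whole frontiers of paths
def espChildren (adjacency : List (String × List String)) (p : List String) :
    List (List String) :=
  match PySem.List.pyGet? p (-1) with
  | none => []
  | some c =>
    (((PySem.Dict.mk adjacency).getD c []).filter (fun n => !p.contains n)).map
      (fun n => p ++ [n])

theorem espChildren_measure_lt (adjacency : List (String × List String)) (p : List String) :
    pvMeasure adjacency (espChildren adjacency p) < pvPot adjacency p := by
  cases h : PySem.List.pyGet? p (-1) with
  | none =>
    rw [espChildren, h]
    simpa [pvMeasure] using pvPot_pos adjacency p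
  | some c =>
    rw [espChildren, h]
    exact sum_children_lt adjacency c p

theorem flatMap_children_measure_lt (adjacency : List (String × List String))
    (level : List (List String)) (h : level ≠ []) :
    pvMeasure adjacency (level.flatMap (espChildren adjacency)) < pvMeasure adjacency level := by
  induction level with
  | nil => cases h rfl
  | cons p l ih =>
    have h1 := espChildren_measure_lt adjacency p
    rw [List.flatMap_cons, pvMeasure_append, pvMeasure_cons]
    by_cases hl : l = []
    · subst hl
      simp only [List.flatMap_nil]
      omega
    · have h2 := ih hl; omega

def espLevels (adjacency : List (String × List String)) (dst : String) (max_paths : Int)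
    (level : List (List String)) : List (List String) :=
  if h : level = [] then []
  else
    let hits := level.filter (iddHit dst)
    if hits.isEmpty then
      espLevels adjacency dst max_paths (level.flatMap (espChildren adjacency))
    else
      PySem.List.slice hits none (some max_paths)
termination_by pvMeasure adjacency level
decreasing_by
  simpa using flatMap_children_measure_lt adjacency level h

theorem last_some {p : List String} (h : p ≠ []) :
    ∃ c, PySem.List.pyGet? p (-1) = some c := by
  rw [PySem.List.pyGet?_neg_one]
  cases hp : p.getLast? with
  | none => exact absurd (List.getLast?_eq_none_iff.1 hp) h
  | some c => exact ⟨c, rfl⟩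

theorem mem_espChildren {adjacency : List (String × List String)} {p q : List String}
    (h : q ∈ espChildren adjacency p) : ∃ n, q = p ++ [n] := by
  rw [espChildren] at h
  cases hg : PySem.List.pyGet? p (-1) with
  | none => rw [hg] at h; cases h
  | some c =>
    rw [hg] at h
    obtain ⟨n, _, hn⟩ := List.mem_map.1 h
    exact ⟨n, hn.symm⟩

theorem phase2_drain (adjacency : List (String × List String)) (dst : String)
    (max_paths : Int) (L : Int) :
    ∀ (nxt results : List (List String)),
      (∀ p ∈ nxt, p ≠ [] ∧ L < (p.length : Int)) →
      espLoopA adjacency dst max_paths nxt results (some L) = results := by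
  intro nxt
  induction nxt with
  | nil => intro results _; rw [espLoopA]
  | cons p rest ih =>
    intro results h
    obtain ⟨hne, hlen⟩ := h p (by simp)
    rw [espLoopA]
    by_cases hf : ((results.length : Int) < max_paths)
    · rw [if_pos hf]
      obtain ⟨c, hc⟩ := last_some hne
      simp only [hc]
      have hskip : espSkip (some L) p.length = true := by
        simp only [espSkip]; exact decide_eq_true hlen
      rw [if_pos hskip]
      exact ih _ (fun q hq => h q (by simp [hq]))
    · rw [if_neg hf]

theorem phase2 (adjacency : List (String × List String)) (dst : String)
    (max_paths : Int) (L : Int) :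
    ∀ (cur nxt results : List (List String)),
      (∀ p ∈ cur, p ≠ [] ∧ (p.length : Int) = L) →
      (∀ p ∈ nxt, p ≠ [] ∧ L < (p.length : Int)) →
      espLoopA adjacency dst max_paths (cur ++ nxt) results (some L)
        = results ++ (cur.filter (iddHit dst)).take (max_paths - results.length).toNat := by
  intro cur
  induction cur with
  | nil =>
    intro nxt results _ hnxt
    rw [List.nil_append, phase2_drain adjacency dst max_paths L nxt results hnxt]
    simp
  | cons p cur' ih =>
    intro nxt results hcur hnxt
    obtain ⟨hne, hlen⟩ := hcur p (by simp)
    obtain ⟨c, hc⟩ := last_some hne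
    have hcur' : ∀ q ∈ cur', q ≠ [] ∧ (q.length : Int) = L :=
      fun q hq => hcur q (by simp [hq])
    rw [List.cons_append, espLoopA]
    by_cases hf : ((results.length : Int) < max_paths)
    · rw [if_pos hf]
      simp only [hc]
      have hskip : espSkip (some L) p.length = false := by
        simp only [espSkip]; rw [hlen]; simp
      rw [hskip, if_neg (by simp)]
      by_cases hhit : (c == dst) = true
      · rw [if_pos hhit]
        have hhitp : iddHit dst p = true := by simp [iddHit, hc, hhit]
        rw [hlen, ih _ _ hcur' hnxt]
        have h1 : (max_paths - (results.length : Int)).toNat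
            = (max_paths - ((results ++ [p]).length : Int)).toNat + 1 := by
          simp only [List.length_append, List.length_cons, List.length_nil]
          omega
        simp only [List.filter_cons, hhitp, if_pos, h1, List.take_succ_cons]
        simp
      · rw [if_neg hhit]
        have hhitp : iddHit dst p = false := by
          simp only [iddHit, hc]; exact Bool.eq_false_iff.2 (fun hx => hhit hx)
        have hch : espChildren adjacency p
            = (((PySem.Dict.mk adjacency).getD c []).filter (fun n => !p.contains n)).map
                (fun n => p ++ [n]) := by
          rw [espChildren, hc]
        rw [push_foldl, List.append_assoc, ← hch]
        rw [ih (nxt ++ espChildren adjacency p) results hcur' ?_]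
        · simp [hhitp]
        · intro q hq
          rcases List.mem_append.1 hq with hq | hq
          · exact hnxt q hq
          · obtain ⟨n, rfl⟩ := mem_espChildren hq
            refine ⟨by simp, ?_⟩
            rw [← hlen]
            simp
    · rw [if_neg hf]
      have h0 : (max_paths - (results.length : Int)).toNat = 0 := by omega
      rw [h0]
      simp

theorem phase1 (adjacency : List (String × List String)) (dst : String)
    (max_paths : Int) (L : Int) (hpos : 0 < max_paths) :
    ∀ (cur nxt : List (List String)),
      (∀ p ∈ cur, p ≠ [] ∧ (p.length : Int) = L) →
      (∀ p ∈ nxt, p ≠ [] ∧ (p.length : Int) = L + 1) →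
      espLoopA adjacency dst max_paths (cur ++ nxt) [] none
        = if cur.filter (iddHit dst) = [] then
            espLoopA adjacency dst max_paths
              (nxt ++ cur.flatMap (espChildren adjacency)) [] none
          else (cur.filter (iddHit dst)).take max_paths.toNat := by
  intro cur
  induction cur with
  | nil =>
    intro nxt _ _
    simp
  | cons p cur' ih =>
    intro nxt hcur hnxt
    obtain ⟨hne, hlen⟩ := hcur p (by simp)
    obtain ⟨c, hc⟩ := last_some hne
    have hcur' : ∀ q ∈ cur', q ≠ [] ∧ (q.length : Int) = L :=
      fun q hq => hcur q (by simp [hq])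
    rw [List.cons_append, espLoopA]
    rw [if_pos (by simp; omega)]
    simp only [hc]
    rw [show espSkip none p.length = false from rfl, if_neg (by simp)]
    by_cases hhit : (c == dst) = true
    · rw [if_pos hhit]
      have hhitp : iddHit dst p = true := by simp [iddHit, hc, hhit]
      rw [hlen]
      have h2 := phase2 adjacency dst max_paths L cur' nxt [p] hcur'
        (fun q hq => ⟨(hnxt q hq).1, by have := (hnxt q hq).2; omega⟩)
      rw [List.nil_append, h2]
      have h1 : (max_paths - (([p] : List (List String)).length : Int)).toNat
          = max_paths.toNat - 1 := by simp
      have h3 : max_paths.toNat = (max_paths.toNat - 1) + 1 := by omega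
      simp only [List.filter_cons, hhitp, if_pos, h1]
      rw [if_neg (by simp)]
      rw [h3, List.take_succ_cons]
      simp
    · rw [if_neg hhit]
      have hhitp : iddHit dst p = false := by
        simp only [iddHit, hc]; exact Bool.eq_false_iff.2 (fun hx => hhit hx)
      have hch : espChildren adjacency p
          = (((PySem.Dict.mk adjacency).getD c []).filter (fun n => !p.contains n)).map
              (fun n => p ++ [n]) := by
        rw [espChildren, hc]
      rw [push_foldl, List.append_assoc, ← hch]
      rw [ih (nxt ++ espChildren adjacency p) ?_ ?_]
      · simp only [List.filter_cons, hhitp, Bool.false_eq_true, if_false,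
          List.flatMap_cons, List.append_assoc]
      · exact hcur'
      · intro q hq
        rcases List.mem_append.1 hq with hq | hq
        · exact hnxt q hq
        · obtain ⟨n, rfl⟩ := mem_espChildren hq
          refine ⟨by simp, ?_⟩
          rw [← hlen]
          simp

theorem main_levels (adjacency : List (String × List String)) (dst : String)
    (max_paths : Int) (hpos : 0 < max_paths) :
    ∀ (n : Nat) (level : List (List String)), pvMeasure adjacency level ≤ n →
      (∃ L : Int, ∀ p ∈ level, p ≠ [] ∧ (p.length : Int) = L) →
      espLoopA adjacency dst max_paths level [] none
        = espLevels adjacency dst max_paths level := by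
  intro n
  induction n with
  | zero =>
    intro level hm _
    have hnil : level = [] := by
      cases level with
      | nil => rfl
      | cons p l =>
        exfalso
        have := pvPot_pos adjacency p
        rw [pvMeasure_cons] at hm
        omega
    subst hnil
    rw [espLoopA, espLevels]
    simp
  | succ n ih =>
    intro level hm hL
    by_cases hnil : level = []
    · subst hnil
      rw [espLoopA, espLevels]
      simp
    · obtain ⟨L, hL⟩ := hL
      have h1 := phase1 adjacency dst max_paths L hpos level [] hL (by simp)
      rw [List.append_nil] at h1
      rw [h1, espLevels]
      simp only [dif_neg hnil]
      by_cases hh : level.filter (iddHit dst) = []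
      · rw [if_pos hh, List.nil_append, hh]
        simp only [List.isEmpty_nil, if_pos]
        apply ih
        · have hlt := flatMap_children_measure_lt adjacency level hnil
          omega
        · refine ⟨L + 1, ?_⟩
          intro q hq
          obtain ⟨p, hp, hq⟩ := List.mem_flatMap.1 hq
          obtain ⟨m, rfl⟩ := mem_espChildren hq
          obtain ⟨_, hplen⟩ := hL p hp
          refine ⟨by simp, ?_⟩
          rw [← hplen]
          simp
      · rw [if_neg hh]
        have hie : (level.filter (iddHit dst)).isEmpty = false := by
          simpa [List.isEmpty_iff] using hh
        rw [hie]
        simp only [Bool.false_eq_true, if_false]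
        rw [PySem.List.slice_to _ (by omega)]

-- == the two recursion shapes agree: one DFS step at the leaves is one frontier step ==
theorem iddDfs_succ (adjacency : List (String × List String)) (b : Nat) (p : List String) :
    iddDfs adjacency (b + 1) p =
      match PySem.List.pyGet? p (-1) with
      | none => []
      | some c =>
        (((PySem.Dict.mk adjacency).getD c []).filter (fun n => !p.contains n)).flatMap
          (fun n => iddDfs adjacency b (p ++ [n])) := rfl

theorem flatMap_single {α β : Type} (l : List α) (f : α → β) :
    l.flatMap (fun x => [f x]) = l.map f := by
  induction l with
  | nil => rfl
  | cons a l ih => simp [List.flatMap_cons, ih]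

theorem dfs_shift (adjacency : List (String × List String)) :
    ∀ (b : Nat) (p : List String),
      iddDfs adjacency (b + 1) p = (iddDfs adjacency b p).flatMap (espChildren adjacency) := by
  intro b
  induction b with
  | zero =>
    intro p
    cases hg : PySem.List.pyGet? p (-1) with
    | none => simp [iddDfs_succ, iddDfs, espChildren, hg, List.flatMap_cons]
    | some c => simp [iddDfs_succ, iddDfs, espChildren, hg, List.flatMap_cons, flatMap_single]
  | succ b ih =>
    intro p
    cases hg : PySem.List.pyGet? p (-1) with
    | none => simp [iddDfs_succ, hg]
    | some c =>
      have ih' : ∀ n, iddDfs adjacency (b + 1) (p ++ [n])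
          = (iddDfs adjacency b (p ++ [n])).flatMap (espChildren adjacency) :=
        fun n => ih (p ++ [n])
      rw [iddDfs_succ adjacency (b + 1) p]
      conv_rhs => rw [iddDfs_succ adjacency b p]
      simp only [hg]
      simp only [ih']
      rw [List.flatMap_assoc]

theorem levels_eq_solve (adjacency : List (String × List String)) (src dst : String)
    (max_paths : Int) :
    ∀ (k r : Nat), (iddUniverse adjacency src).length + 1 - r ≤ k →
      espLevels adjacency dst max_paths (iddDfs adjacency r [src])
        = iddSolve adjacency src dst max_paths r := by
  intro k
  induction k with
  | zero =>
    intro r hk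
    have hnil : iddDfs adjacency r [src] = [] := by
      by_contra hne
      have := idd_depth_lt adjacency src r hne
      omega
    rw [hnil, espLevels, iddSolve, hnil]
    simp
  | succ k ih =>
    intro r hk
    by_cases hnil : iddDfs adjacency r [src] = []
    · rw [hnil, espLevels, iddSolve, hnil]
      simp
    · rw [espLevels, iddSolve]
      simp only [dif_neg hnil]
      by_cases hh : ((iddDfs adjacency r [src]).filter (iddHit dst)).isEmpty = true
      · rw [if_pos hh, if_pos hh]
        have hle : (iddUniverse adjacency src).length + 1 - (r + 1) ≤ k := by omega
        rw [← dfs_shift adjacency r [src], ih (r + 1) hle]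
        have hne : (iddDfs adjacency r [src]).isEmpty = false := by
          simpa [List.isEmpty_iff] using hnil
        rw [hne]
        simp
      · rw [if_neg hh, if_neg hh]

-- ===== VERDICT (by name: the statement is the Claim_ definition above) =====
theorem enumerate_shortest_paths_py_spec : Claim_equal_enumerate_shortest_paths_py := by
  intro adjacency src dst max_paths _
  unfold Spec_enumerate_shortest_paths_py enumerate_shortest_paths_py
    enumerate_shortest_paths_py_alt
  by_cases h : max_paths ≤ 0
  · simp only [h, if_true]
    rw [espLoopA]
    rw [if_neg (by simp; omega)]
  · simp only [h, if_false]
    have h1 := main_levels adjacency dst max_paths (by omega) (pvMeasure adjacency [[src]])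
      [[src]] le_rfl ⟨1, by intro p hp; simp at hp; subst hp; simp⟩
    have h2 := levels_eq_solve adjacency src dst max_paths
      ((iddUniverse adjacency src).length + 1) 0 (by omega)
    rw [h1]
    rw [show iddDfs adjacency 0 [src] = [[src]] from rfl] at h2
    exact h2
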